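-- pv_equiv track=rewrite | github.com/sverrier/osu-alternative | bot/util/presets.py | invert_synonyms
-- ===== SOURCE A (Python) =====
-- def invert_synonyms(syn_map: dict) -> dict:
--     """canonical -> sorted list of aliases (excluding canonical itself)"""
--     out = {}
--     for alias, canonical in syn_map.items():
--         out.setdefault(canonical, set()).add(alias)
--
--     cleaned = {}
--     for canonical, aliases in out.items():
--         aliases = set(aliases)
--         aliases.discard(canonical)
--         cleaned[canonical] = sorted(aliases)
--     return cleaned
-- ===== SOURCE B (Python) =====
-- def invert_synonyms(syn_map: dict) -> dict:
--     """canonical -> sorted list of aliases (excluding canonical itself)"""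
--     cleaned = {canonical: [] for canonical in syn_map.values()}
--     for alias in sorted(syn_map):
--         canonical = syn_map[alias]
--         if alias != canonical:
--             cleaned[canonical].append(alias)
--     return cleaned
-- ===== Notes on version B (the rewrite author's own statement) =====
-- stated objective: alternative
-- what changed: B replaces A's two dict passes (group aliases into per-canonical sets, then sort each group) by one pass over the aliases in globally sorted order, appending each alias to its canonical's list so every group comes out already sorted with no sets and no per-group sort.
import Mathlib
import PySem

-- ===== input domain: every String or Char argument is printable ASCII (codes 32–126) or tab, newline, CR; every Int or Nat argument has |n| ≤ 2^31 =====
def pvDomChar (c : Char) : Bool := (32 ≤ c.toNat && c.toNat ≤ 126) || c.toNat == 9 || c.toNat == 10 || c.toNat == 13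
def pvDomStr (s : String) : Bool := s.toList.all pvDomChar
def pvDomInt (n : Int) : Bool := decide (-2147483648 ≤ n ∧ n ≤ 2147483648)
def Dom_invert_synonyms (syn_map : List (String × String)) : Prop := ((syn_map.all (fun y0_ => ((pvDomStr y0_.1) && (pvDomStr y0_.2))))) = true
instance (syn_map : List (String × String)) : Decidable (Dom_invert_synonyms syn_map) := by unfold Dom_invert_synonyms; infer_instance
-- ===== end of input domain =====

-- B inverts the map in a single pass over the aliases taken in globally sorted order,
-- so each canonical's alias list is built already sorted and no per-group set/sort is needed
-- (objective: alternative decomposition; same asymptotic cost).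

-- ===== PORT A =====
def invert_synonyms (syn_map : List (String × String)) : List (String × List String) :=
  let d : PySem.Dict String String := PySem.Dict.ofList syn_map
  let out : PySem.Dict String (PySem.Set String) :=
    d.items.foldl (fun o p => o.modify p.2 PySem.Set.empty (fun s => PySem.Set.add s p.1))
      PySem.Dict.empty
  let cleaned : PySem.Dict String (List String) :=
    out.items.foldl (fun c p =>
      c.insert p.1
        (PySem.List.sorted (PySem.Set.discard (PySem.Set.ofList p.2) p.1) (fun x => x) false))
      PySem.Dict.empty
  cleaned.items

-- ===== PORT B =====
def invert_synonyms_alt (syn_map : List (String × String)) : List (String × List String) :=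
  let d : PySem.Dict String String := PySem.Dict.ofList syn_map
  let cleaned0 : PySem.Dict String (List String) :=
    d.values.foldl (fun c v => c.insert v []) PySem.Dict.empty
  let cleaned : PySem.Dict String (List String) :=
    (PySem.List.sorted d.keys (fun x => x) false).foldl (fun c a =>
      match d.get? a with
      | some canonical =>
          if a ≠ canonical then c.modify canonical [] (fun l => l ++ [a]) else c
      | none => c) cleaned0
  cleaned.items

-- ===== PRECONDITION & SPEC =====
def Spec_invert_synonyms (syn_map : List (String × String)) (out : List (String × List String)) : Prop := out = invert_synonyms_alt syn_map
instance (syn_map : List (String × String)) (out : List (String × List String)) : Decidable (Spec_invert_synonyms syn_map out) := by unfold Spec_invert_synonyms; infer_instance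

-- ===== CLAIM (what is proved, stated in full; the proofs are below) =====
def Claim_equal_invert_synonyms : Prop := ∀ (syn_map : List (String × String)), Dom_invert_synonyms syn_map → Spec_invert_synonyms syn_map (invert_synonyms syn_map)

-- ===== LEMMAS AND PROOFS =====

-- A's grouping loop: the set stored at c collects, in order, the aliases whose canonical is c
theorem outA_getD (l : List (String × String)) (o : PySem.Dict String (PySem.Set String))
    (c : String) :
    (l.foldl (fun o p => o.modify p.2 PySem.Set.empty (fun s => PySem.Set.add s p.1)) o).getD c
        PySem.Set.empty
      = PySem.Set.update (o.getD c PySem.Set.empty)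
          ((l.filter (fun p => p.2 == c)).map (·.1)) := by
  induction l generalizing o with
  | nil => simp [PySem.Set.update]
  | cons p l ih =>
      simp only [List.foldl_cons, List.filter_cons]
      rw [ih, PySem.Dict.getD_modify]
      by_cases hc : p.2 = c
      · subst hc; simp [PySem.Set.update]
      · rw [if_neg (fun h => hc (Eq.symm h)), if_neg (by simpa using hc)]

-- B's seeding loop stores [] at every key
theorem cleaned0_getD (vs : List String) (c0 : PySem.Dict String (List String))
    (h : ∀ k, c0.getD k ([] : List String) = []) (k : String) :
    (vs.foldl (fun c v => c.insert v []) c0).getD k [] = [] := by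
  induction vs generalizing c0 with
  | nil => exact h k
  | cons v vs ih =>
      refine ih _ (fun k' => ?_)
      rw [PySem.Dict.getD_insert]
      split <;> simp [h]

-- B's append loop, value at k
theorem foldB_getD (d : PySem.Dict String String) (as : List String)
    (c0 : PySem.Dict String (List String)) (k : String) :
    (as.foldl (fun c a =>
        match d.get? a with
        | some canonical =>
            if a ≠ canonical then c.modify canonical [] (fun l => l ++ [a]) else c
        | none => c) c0).getD k []
      = c0.getD k []
          ++ as.filter (fun a => (d.get? a == some k) && !(a == k)) := by
  induction as generalizing c0 with
  | nil => simp
  | cons a as ih =>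
      simp only [List.foldl_cons, List.filter_cons]
      cases hg : d.get? a with
      | none =>
          simp only [ih]
          simp
      | some ca =>
          simp only []
          by_cases hak : a = ca
          · subst hak
            rw [if_neg (by simp), ih]
            have : ((some a == some k) && !(a == k)) = false := by simp
            rw [this]; simp
          · rw [if_pos (by exact hak), ih, PySem.Dict.getD_modify]
            by_cases hk : k = ca
            · subst hk
              have : ((some k == some k) && !(a == k)) = true := by
                simp; exact fun h => hak h
              rw [if_pos rfl, this]
              simp
            · have : ((some ca == some k) && !(a == k)) = false := by
                simp [beq_iff_eq]; intro h; exact absurd h.symm hk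
              rw [if_neg hk, this]
              simp

-- B's append loop never creates a key when every canonical is already present
theorem foldB_keys (d : PySem.Dict String String) (as : List String)
    (c0 : PySem.Dict String (List String))
    (h : ∀ a ∈ as, ∀ ca, d.get? a = some ca → ca ∈ c0.keys) :
    (as.foldl (fun c a =>
        match d.get? a with
        | some canonical =>
            if a ≠ canonical then c.modify canonical [] (fun l => l ++ [a]) else c
        | none => c) c0).keys = c0.keys := by
  induction as generalizing c0 with
  | nil => rfl
  | cons a as ih =>
      simp only [List.foldl_cons]
      cases hg : d.get? a with
      | none => exact ih c0 (fun a ha => h a (List.mem_cons_of_mem _ ha))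
      | some ca =>
          simp only []
          by_cases hak : a = ca
          · rw [if_neg (by simp [hak])]
            exact ih c0 (fun a ha => h a (List.mem_cons_of_mem _ ha))
          · rw [if_pos (by exact hak)]
            have hkeys : (c0.modify ca [] (fun l => l ++ [a])).keys = c0.keys := by
              rw [PySem.Dict.keys_modify]
              exact PySem.Dict.keys_insert_of_contains _ _
                ((PySem.Dict.contains_iff_mem_keys _ _).mpr
                  (h a (List.mem_cons_self) ca hg))
            rw [ih _ (fun a' ha' ca' hca' => by
              rw [hkeys]; exact h a' (List.mem_cons_of_mem _ ha') ca' hca'), hkeys]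

-- per-canonical value: sorting the grouped set = filtering the globally sorted key list
theorem value_eq (d : PySem.Dict String String) (hnd : d.keys.Nodup) (c : String) :
    PySem.List.sorted
        (PySem.Set.discard
          (PySem.Set.ofList ((d.items.filter (fun p => p.2 == c)).map (·.1))) c)
        (fun x => x) false
      = (PySem.List.sorted d.keys (fun x => x) false).filter
          (fun a => (d.get? a == some c) && !(a == c)) := by
  apply PySem.List.sorted_eq_of_perm_of_pairwise_lt
  · -- Perm
    have hnd1 : (PySem.Set.discard
        (PySem.Set.ofList ((d.items.filter (fun p => p.2 == c)).map (·.1))) c).Nodup := by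
      unfold PySem.Set.discard
      exact (PySem.Set.nodup_ofList _).filter _
    have hnd2 : ((PySem.List.sorted d.keys (fun x => x) false).filter
        (fun a => (d.get? a == some c) && !(a == c))).Nodup := by
      exact ((PySem.List.sorted_perm d.keys _ false).nodup_iff.mpr hnd).filter _
    rw [List.perm_ext_iff_of_nodup hnd2 hnd1]
    intro a
    simp only [List.mem_filter, PySem.List.mem_sorted, PySem.Set.mem_discard,
      PySem.Set.mem_ofList, List.mem_map, Bool.and_eq_true, beq_iff_eq,
      Bool.not_eq_eq_eq_not, Bool.not_true, beq_eq_false_iff_ne, ne_eq]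
    constructor
    · rintro ⟨hk, hg, hne⟩
      refine ⟨⟨(a, c), ?_, rfl⟩, hne⟩
      have := (PySem.Dict.get?_eq_some_iff_mem_items d a c hnd).mp hg
      simpa using this
    · rintro ⟨⟨p, hp, rfl⟩, hne⟩
      obtain ⟨hmem0, hpc⟩ := hp
      have hmem : (p.1, c) ∈ d.items := by rw [← hpc]; exact hmem0
      have hg := (PySem.Dict.get?_eq_some_iff_mem_items d p.1 c hnd).mpr hmem
      refine ⟨?_, hg, hne⟩
      have h5 : p.1 ∈ d.items.map (·.1) := List.mem_map.mpr ⟨(p.1, c), hmem, rfl⟩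
      simpa [PySem.Dict.keys] using h5
  · -- pairwise <
    have h1 := PySem.List.sorted_pairwise d.keys (fun x => x)
    have h2 : (PySem.List.sorted d.keys (fun x => x) false).Nodup :=
      (PySem.List.sorted_perm d.keys _ false).nodup_iff.mpr hnd
    have h3 : (PySem.List.sorted d.keys (fun x => x) false).Pairwise (· < ·) := by
      refine (h1.and h2).imp ?_
      rintro a b ⟨hle, hne⟩
      exact lt_of_le_of_ne hle hne
    exact h3.filter _

-- the two ports agree on every input
theorem main_eq (syn_map : List (String × String)) :
    invert_synonyms syn_map = invert_synonyms_alt syn_map := by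
  unfold invert_synonyms invert_synonyms_alt
  simp only []
  set d : PySem.Dict String String := PySem.Dict.ofList syn_map with hd
  have hnd : d.keys.Nodup := PySem.Dict.nodup_keys_ofList syn_map
  -- A side
  set out : PySem.Dict String (PySem.Set String) :=
    d.items.foldl (fun o p => o.modify p.2 PySem.Set.empty (fun s => PySem.Set.add s p.1))
      PySem.Dict.empty with hout
  have hkeysA : out.keys = PySem.Set.ofList (d.items.map (·.2)) := by
    rw [hout, PySem.Dict.keys_foldl_modify_key d.items (·.2) PySem.Set.empty
      (fun _ p => fun s => PySem.Set.add s p.1) PySem.Dict.empty]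
    rw [PySem.Dict.keys_empty, PySem.Set.update_nil_left]
  have houtnd : out.keys.Nodup := by
    rw [hout]
    exact PySem.Dict.nodup_keys_foldl_modify_key _ _ _ _ _ PySem.Dict.nodup_keys_empty
  have hA : (out.items.foldl (fun c p =>
      c.insert p.1
        (PySem.List.sorted (PySem.Set.discard (PySem.Set.ofList p.2) p.1) (fun x => x) false))
      PySem.Dict.empty).items
      = out.items.map (fun p => (p.1,
          PySem.List.sorted (PySem.Set.discard (PySem.Set.ofList p.2) p.1) (fun x => x) false)) := by
    rw [PySem.Dict.items_foldl_insert_fresh out.items (·.1)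
      (fun p => PySem.List.sorted (PySem.Set.discard (PySem.Set.ofList p.2) p.1) (fun x => x) false)
      PySem.Dict.empty (fun p _ => PySem.Dict.contains_empty _) (by
        show (out.items.map (·.1)).Nodup
        exact houtnd)]
    simp [PySem.Dict.empty]
  rw [hA, PySem.Dict.items_eq_map_keys out houtnd PySem.Set.empty, List.map_map]
  have hvalA : ∀ c, out.getD c PySem.Set.empty
      = PySem.Set.ofList ((d.items.filter (fun p => p.2 == c)).map (·.1)) := by
    intro c
    rw [hout, outA_getD, PySem.Dict.getD_empty, PySem.Set.update_empty]
  -- B side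
  set cleaned0 : PySem.Dict String (List String) :=
    d.values.foldl (fun c v => c.insert v []) PySem.Dict.empty with hc0
  have hkeys0 : cleaned0.keys = PySem.Set.ofList d.values := by
    rw [hc0, PySem.Dict.keys_foldl_insert d.values (fun _ _ => []) PySem.Dict.empty,
      PySem.Dict.keys_empty, PySem.Set.update_nil_left]
  have hnd0 : cleaned0.keys.Nodup := by
    rw [hc0]
    exact PySem.Dict.nodup_keys_foldl_insert _ _ _ PySem.Dict.nodup_keys_empty
  set cleanedB : PySem.Dict String (List String) :=
    (PySem.List.sorted d.keys (fun x => x) false).foldl (fun c a =>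
      match d.get? a with
      | some canonical =>
          if a ≠ canonical then c.modify canonical [] (fun l => l ++ [a]) else c
      | none => c) cleaned0 with hcB
  have hkeysB : cleanedB.keys = cleaned0.keys := by
    rw [hcB]
    apply foldB_keys
    intro a _ ca hca
    rw [hkeys0]
    have : (a, ca) ∈ d.items := PySem.Dict.mem_items_of_get?_eq_some d hca
    exact (PySem.Set.mem_ofList _ _).mpr (List.mem_map.mpr ⟨(a, ca), this, rfl⟩)
  have hndB : cleanedB.keys.Nodup := by rw [hkeysB]; exact hnd0
  rw [PySem.Dict.items_eq_map_keys cleanedB hndB [], hkeysB, hkeys0]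
  have hvalB : ∀ c, cleanedB.getD c []
      = (PySem.List.sorted d.keys (fun x => x) false).filter
          (fun a => (d.get? a == some c) && !(a == c)) := by
    intro c
    rw [hcB, foldB_getD, cleaned0_getD d.values PySem.Dict.empty
      (fun k => PySem.Dict.getD_empty k []) c]
    simp
  -- combine
  rw [hkeysA]
  have : d.items.map (·.2) = d.values := rfl
  rw [this]
  apply List.map_congr_left
  intro c _
  simp only [Function.comp_apply]
  rw [hvalA c, hvalB c, PySem.Set.ofList_ofList, value_eq d hnd c]

-- ===== VERDICT (by name: the statement is the Claim_ definition above) =====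
theorem invert_synonyms_spec : Claim_equal_invert_synonyms := by
  intro syn_map _
  unfold Spec_invert_synonyms
  exact main_eq syn_map
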